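-- pv_equiv track=rewrite | github.com/siddhp40/Flight-Management | FlightManagement.py | nextValue
-- ===== SOURCE A (Python) =====
-- def nextValue(certainLine, index):
--     value = ""
--     for i in range(index, len(certainLine)):
--         if certainLine[i] == ',':
--             index = i+1
--             break
--         else:
--             value += certainLine[i]
--     value = value.strip()
--     return value, index
-- ===== SOURCE B (Python) =====
-- def nextValue(certainLine, index):
--     pos = certainLine.find(',', index)
--     if pos == -1:
--         value = certainLine[index:]
--     else:
--         value = certainLine[index:pos]
--         index = pos + 1
--     return value.strip(), index
-- ===== Notes on version B (the rewrite author's own statement) =====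
-- stated objective: simpler
-- what changed: B replaces A's per-character Python scan loop that accumulates the field and breaks at the comma by a single find(',', index) followed by one slice and one strip (C-level primitives, one pass each).
-- intended difference: For -len(certainLine) <= index < 0, A's range(index, len) reads the last |index| characters and then wraps around to rescan the string from position 0, returning a duplicated/garbled field with a rescan-derived index; B returns the stripped tail certainLine[index:] with Python slice semantics and the index handled as a slice bound, the intended 'rest of the field from here' value. — e.g. on nextValue("a,b", -1): A returns ("ba", 2), B returns ("b", -1)
import Mathlib
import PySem

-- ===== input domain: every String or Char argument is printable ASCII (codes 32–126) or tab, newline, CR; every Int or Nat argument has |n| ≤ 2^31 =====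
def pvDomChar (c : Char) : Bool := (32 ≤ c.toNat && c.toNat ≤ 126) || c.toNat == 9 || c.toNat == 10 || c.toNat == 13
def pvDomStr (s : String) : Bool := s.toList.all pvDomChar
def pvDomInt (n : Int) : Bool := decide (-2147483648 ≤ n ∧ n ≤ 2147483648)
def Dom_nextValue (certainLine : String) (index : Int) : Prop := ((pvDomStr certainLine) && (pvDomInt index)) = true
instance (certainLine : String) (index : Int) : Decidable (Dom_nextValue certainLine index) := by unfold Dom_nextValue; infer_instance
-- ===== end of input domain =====

-- B replaces A's character-by-character accumulation loop (with break) by a single find(',', index) plus a slice — simpler, and measured faster at large sizes; on -len ≤ index < 0 B intentionally differs from A's wraparound rescan (see D_nextValue).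

-- ===== PORT A =====
-- the for-loop over range(index, len(certainLine)) with the growing `value` string (kept as List Char)
-- and the mutable `index`; the `none` branch of pyGet? is where Python raises IndexError (outside Pre_).
def nextValueLoop (s : List Char) : List Int → List Char → Int → List Char × Int
  | [], value, index => (value, index)
  | i :: rest, value, index =>
    match PySem.List.pyGet? s i with
    | none => (value, index)
    | some c =>
      if c = ',' then (value, i + 1)
      else nextValueLoop s rest (value ++ [c]) index

def nextValue (certainLine : String) (index : Int) : String × Int :=
  let r := nextValueLoop certainLine.toList
             (PySem.List.pyRange index (PySem.Str.len certainLine) 1) [] index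
  (PySem.Str.strip (String.ofList r.1), r.2)

-- ===== PORT B =====
def nextValue_alt (certainLine : String) (index : Int) : String × Int :=
  let pos := PySem.Str.findFrom certainLine "," index
  if pos = -1 then
    (PySem.Str.strip (PySem.Str.slice certainLine (some index) none), index)
  else
    (PySem.Str.strip (PySem.Str.slice certainLine (some index) (some pos)), pos + 1)

-- ===== PRECONDITION & SPEC =====
-- Pre_ excludes exactly the inputs where A raises IndexError: index < -len(certainLine)
-- (the first loop iteration then reads certainLine[index] out of range).
def Pre_nextValue (certainLine : String) (index : Int) : Prop :=
  -(PySem.Str.len certainLine) ≤ index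
instance (certainLine : String) (index : Int) : Decidable (Pre_nextValue certainLine index) := by
  unfold Pre_nextValue; infer_instance

def pvWitness_nextValue : String × Int := ("ab, cd", 0)

-- On -len ≤ index < 0 A's range(index, len) reads the last |index| characters and then WRAPS AROUND and rescans
-- the string from position 0 (negative-index wraparound), returning a duplicated/garbled field; B returns the
-- stripped tail certainLine[index:] (Python slice semantics), the intended "rest of the field from here" value.
def D_nextValue (certainLine : String) (index : Int) : Prop := index < 0
instance (certainLine : String) (index : Int) : Decidable (D_nextValue certainLine index) := by
  unfold D_nextValue; infer_instance

def Spec_nextValue (certainLine : String) (index : Int) (out : String × Int) : Prop :=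
  ¬ D_nextValue certainLine index → out = nextValue_alt certainLine index
instance (certainLine : String) (index : Int) (out : String × Int) : Decidable (Spec_nextValue certainLine index out) := by
  unfold Spec_nextValue; infer_instance

def pvDiffWitness_nextValue : String × Int := ("a,b", -1)
def pvDiffWitnessOut_nextValue : (String × Int) × (String × Int) := (("ba", 2), ("b", -1))

-- ===== CLAIM (what is proved, stated in full; the proofs are below) =====
def Claim_unchanged_nextValue : Prop := ∀ (certainLine : String) (index : Int), Dom_nextValue certainLine index → Pre_nextValue certainLine index → Spec_nextValue certainLine index (nextValue certainLine index)
def Claim_changed_nextValue : Prop := Dom_nextValue (pvDiffWitness_nextValue.1) (pvDiffWitness_nextValue.2) ∧ Pre_nextValue (pvDiffWitness_nextValue.1) (pvDiffWitness_nextValue.2) ∧ D_nextValue (pvDiffWitness_nextValue.1) (pvDiffWitness_nextValue.2) ∧ nextValue (pvDiffWitness_nextValue.1) (pvDiffWitness_nextValue.2) = pvDiffWitnessOut_nextValue.1 ∧ nextValue_alt (pvDiffWitness_nextValue.1) (pvDiffWitness_nextValue.2) = pvDiffWitnessOut_nextValue.2 ∧ pvDiffWitnessOut_nextValue.1 ≠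 pvDiffWitnessOut_nextValue.2

-- ===== LEMMAS AND PROOFS =====

-- proof-side characterisation of "the field starting here": the characters before the first comma,
-- and the offset of that comma if any
def pvField : List Char → List Char × Option Nat
  | [] => ([], none)
  | c :: t =>
    if c = ',' then ([], some 0)
    else (c :: (pvField t).1, (pvField t).2.map (· + 1))

theorem pvField_none (d : List Char) (h : (pvField d).2 = none) : (pvField d).1 = d := by
  induction d with
  | nil => rfl
  | cons c t ih =>
    by_cases hc : c = ','
    · simp [pvField, hc] at h
    · simp only [pvField, if_neg hc, Option.map_eq_none_iff] at h
      simp only [pvField, if_neg hc, List.cons.injEq, true_and]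
      exact ih h

theorem pvField_some (d : List Char) (k : Nat) (h : (pvField d).2 = some k) :
    (pvField d).1 = d.take k ∧ k < d.length := by
  induction d generalizing k with
  | nil => simp [pvField] at h
  | cons c t ih =>
    by_cases hc : c = ','
    · simp only [pvField, if_pos hc, Option.some.injEq] at h
      subst h
      simp [pvField, hc]
    · simp only [pvField, if_neg hc, Option.map_eq_some_iff] at h
      rcases h with ⟨j, hj, rfl⟩
      rcases ih j hj with ⟨h1, h2⟩
      simp only [pvField, if_neg hc, List.take_succ_cons, List.cons.injEq, true_and, List.length_cons]
      exact ⟨h1, by omega⟩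

theorem find_go_step (c : Char) (t : List Char) (k : Nat) :
    PySem.Chars.find.go [','] (c :: t) k =
      if c = ',' then (k : Int) else PySem.Chars.find.go [','] t (k + 1) := by
  rw [PySem.Chars.find.go]
  by_cases hc : c = ','
  · simp [List.isPrefixOf, hc]
  · have hc' : ¬ (',' = c) := fun h => hc h.symm
    simp [List.isPrefixOf, hc, hc']

theorem find_go_comma (d : List Char) (k : Nat) :
    PySem.Chars.find.go [','] d k =
      match (pvField d).2 with
      | none => -1
      | some j => ((k + j : Nat) : Int) := by
  induction d generalizing k with
  | nil =>
    rw [PySem.Chars.find.go]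
    simp [pvField]
  | cons c t ih =>
    rw [find_go_step]
    by_cases hc : c = ','
    · simp [hc, pvField]
    · rw [if_neg hc, ih (k + 1)]
      simp only [pvField, if_neg hc]
      rcases hp : (pvField t).2 with - | j
      · simp
      · simp only [Option.map_some]
        push_cast
        ring

theorem find_comma (d : List Char) :
    PySem.Chars.find d [','] =
      match (pvField d).2 with
      | none => -1
      | some j => (j : Int) := by
  have := find_go_comma d 0
  simp only [PySem.Chars.find] at *
  simpa using this

theorem pyGet?_natCast (xs : List Char) (k : Nat) (hk : k < xs.length) :
    PySem.List.pyGet? xs (k : Int) = xs[k]? := by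
  simp [PySem.List.pyGet?, PySem.List.pyIdx?, hk]

theorem loopA (s : List Char) (m : Nat) :
    ∀ (n : Nat) (v : List Char) (idx0 : Int), n ≤ s.length → s.length - n ≤ m →
    nextValueLoop s (PySem.List.pyRange (n : Int) ((s.length : Nat) : Int) 1) v idx0 =
      match (pvField (s.drop n)).2 with
      | none => (v ++ (pvField (s.drop n)).1, idx0)
      | some k => (v ++ (pvField (s.drop n)).1, (n : Int) + (k : Int) + 1) := by
  induction m with
  | zero =>
    intro n v idx0 hn hm
    have hEq : n = s.length := by omega
    subst hEq
    rw [PySem.List.pyRange_one_eq_nil (by omega)]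
    simp [nextValueLoop, pvField]
  | succ m ih =>
    intro n v idx0 hn hm
    by_cases hlt : n < s.length
    · rw [PySem.List.pyRange_one_cons (by exact_mod_cast hlt)]
      have hdrop : s.drop n = s[n] :: s.drop (n + 1) := List.drop_eq_getElem_cons hlt
      have hget : PySem.List.pyGet? s (n : Int) = some s[n] := by
        rw [pyGet?_natCast s n hlt]; simp [hlt]
      by_cases hc : s[n] = ','
      · simp only [nextValueLoop, hget, hdrop, pvField, if_pos hc, hc]
        simp
      · have hcast : ((n : Int) + 1) = ((n + 1 : Nat) : Int) := by push_cast; ring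
        simp only [nextValueLoop, hget, if_neg hc, hcast]
        rw [ih (n + 1) (v ++ [s[n]]) idx0 (by omega) (by omega)]
        simp only [hdrop, pvField, if_neg hc]
        rcases hp : (pvField (s.drop (n + 1))).2 with - | j <;> simp [hp] <;> push_cast <;> ring
    · have hEq : n = s.length := by omega
      subst hEq
      rw [PySem.List.pyRange_one_eq_nil (by omega)]
      simp [nextValueLoop, pvField]

theorem findFrom_past (s : List Char) (i : Int) (h : (s.length : Int) < i) :
    PySem.Chars.findFrom s [','] i = -1 := by
  simp only [PySem.Chars.findFrom]
  have h0 : ¬ i < 0 := by omega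
  simp [h0, h]

-- ===== VERDICT (by name: the statement is the Claim_ definition above) =====
theorem nextValue_spec : Claim_unchanged_nextValue := by
  intro certainLine index _ hpre hnd
  have h0 : 0 ≤ index := by unfold D_nextValue at hnd; omega
  have hidx : index = ((index.toNat : Nat) : Int) := by omega
  have hlen : PySem.Str.len certainLine = ((certainLine.toList.length : Nat) : Int) :=
    PySem.Str.len_eq _
  have hsub : ("," : String).toList = [','] := rfl
  show nextValue certainLine index = nextValue_alt certainLine index
  unfold nextValue nextValue_alt
  rw [PySem.Str.findFrom_eq, hsub, hlen, hidx]
  set s := certainLine.toList with hs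
  set n := index.toNat with hn
  by_cases hle : n ≤ s.length
  · -- index within the string (or equal to its length)
    rw [loopA s (s.length - n) n [] ((n : Nat) : Int) hle (le_refl _)]
    rw [PySem.Chars.findFrom_natCast s [','] n hle]
    rcases hp : (pvField (s.drop n)).2 with - | k
    · -- no comma from position n on
      have hfc : PySem.Chars.find (s.drop n) [','] = -1 := by rw [find_comma, hp]
      simp only [hp, hfc, if_pos rfl, List.nil_append, reduceIte]
      refine Prod.ext ?_ rfl
      apply congrArg PySem.Str.strip
      apply String.toList_inj.mp
      rw [String.toList_ofList, PySem.Str.toList_slice, pvField_none _ hp, ← hs]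
      exact (PySem.List.slice_from_natCast s n).symm
    · -- first comma at offset k from position n
      have hfc : PySem.Chars.find (s.drop n) [','] = (k : Int) := by rw [find_comma, hp]
      have hne : ¬ ((k : Int) = -1) := by omega
      rw [hfc]
      rw [if_neg hne]
      simp only [hp, List.nil_append]
      rw [if_neg (by omega : ¬ ((n : Int) + (k : Int) = -1))]
      rcases pvField_some _ _ hp with ⟨hfst, -⟩
      refine Prod.ext ?_ rfl
      apply congrArg PySem.Str.strip
      apply String.toList_inj.mp
      rw [String.toList_ofList, PySem.Str.toList_slice, hfst, ← hs]
      have hcast : ((n : Int) + (k : Int)) = ((n + k : Nat) : Int) := by push_cast; ring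
      rw [hcast]
      show List.take k (List.drop n s) = PySem.List.slice s (some ((n : Nat) : Int)) (some (((n + k : Nat) : Nat) : Int))
      rw [PySem.List.slice_natCast]
      congr 1
      omega
  · -- index past the end of the string: empty scan on both sides
    have hbig : ((s.length : Nat) : Int) < ((n : Nat) : Int) := by exact_mod_cast (by omega : s.length < n)
    rw [findFrom_past s ((n : Nat) : Int) hbig, if_pos rfl]
    rw [PySem.List.pyRange_one_eq_nil (by omega)]
    simp only [nextValueLoop]
    refine Prod.ext ?_ rfl
    apply congrArg PySem.Str.strip
    apply String.toList_inj.mp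
    rw [String.toList_ofList, PySem.Str.toList_slice, ← hs]
    show ([] : List Char) = PySem.List.slice s (some ((n : Nat) : Int)) none
    rw [PySem.List.slice_from _ (by positivity)]
    rw [List.drop_eq_nil_of_le (by omega : s.length ≤ ((n : Nat) : Int).toNat)]

theorem nextValue_changed : Claim_changed_nextValue := by
  unfold Claim_changed_nextValue; decide
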